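-- pv_equiv track=rewrite | github.com/B-Elbably/Railway-to-ACPC | solved/D_Unfair_Game.py | f
-- ===== SOURCE A (Python) =====
-- def f(x) :
--     res = 0
--     while x:
--         res += (x & 1)
--         x -= (x & 1)
--         res += x > 0
--         x >>= 1
--     return res
-- ===== SOURCE B (Python) =====
-- def f(x):
--     # closed form: popcount(x) + bit_length(x) - 1, and 0 for x == 0
--     return bin(x).count('1') + x.bit_length() - 1 if x else 0
-- ===== Notes on version B (the rewrite author's own statement) =====
-- stated objective: simpler
-- what changed: Replaced the bit-walking while loop and accumulator with a loop-free closed form combining the popcount and the bit length of x.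
import Mathlib
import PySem

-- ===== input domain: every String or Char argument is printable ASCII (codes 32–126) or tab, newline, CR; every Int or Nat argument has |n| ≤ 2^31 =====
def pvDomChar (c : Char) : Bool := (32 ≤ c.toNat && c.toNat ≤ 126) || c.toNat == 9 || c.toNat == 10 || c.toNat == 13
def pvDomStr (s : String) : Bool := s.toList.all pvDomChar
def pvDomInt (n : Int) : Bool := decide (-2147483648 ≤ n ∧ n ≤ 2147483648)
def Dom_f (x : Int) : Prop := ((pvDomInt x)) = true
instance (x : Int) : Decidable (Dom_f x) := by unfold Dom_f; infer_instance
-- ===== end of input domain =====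

-- B replaces A's bit-walking loop with a closed form popcount + bit_length - 1 (simpler).

-- ===== PORT A =====
-- A's while loop; on Pre_f (x ≥ 0) the Python state stays a non-negative int, so the
-- loop is transcribed over Nat (x & 1 = x % 2, x >>= 1 = x / 2), step for step.
def fLoopA (x : Nat) (res : Int) : Int :=
  if x = 0 then res
  else
    -- res += (x & 1);  x -= (x & 1);  res += x > 0;  x >>= 1
    fLoopA ((x - x % 2) / 2)
      (res + (x % 2 : Int) + (if 0 < x - x % 2 then 1 else 0))
termination_by x
decreasing_by
  exact Nat.lt_of_le_of_lt (Nat.div_le_div_right (Nat.sub_le _ _))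
    (Nat.div_lt_self (by omega) (by omega))

def f (x : Int) : Int := fLoopA x.toNat 0

-- ===== PORT B =====
-- popcount (bin(x).count('1') for x ≥ 0)
def pvPopcount (n : Nat) : Nat :=
  if n = 0 then 0 else n % 2 + pvPopcount (n / 2)
termination_by n
decreasing_by exact Nat.div_lt_self (by omega) (by omega)

-- x.bit_length()
def pvBitLen (n : Nat) : Nat :=
  if n = 0 then 0 else pvBitLen (n / 2) + 1
termination_by n
decreasing_by exact Nat.div_lt_self (by omega) (by omega)

def f_alt (x : Int) : Int :=
  if x ≠ 0 then (pvPopcount x.toNat : Int) + (pvBitLen x.toNat : Int) - 1 else 0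

-- ===== PRECONDITION & SPEC =====
-- Pre_f excludes negative x, on which the Python A loops forever (never returns).
def Pre_f (x : Int) : Prop := 0 ≤ x
instance (x : Int) : Decidable (Pre_f x) := by unfold Pre_f; infer_instance
def pvWitness_f : Int := (5)

def Spec_f (x : Int) (out : Int) : Prop := out = f_alt x
instance (x : Int) (out : Int) : Decidable (Spec_f x out) := by unfold Spec_f; infer_instance

-- ===== CLAIM (what is proved, stated in full; the proofs are below) =====
def Claim_equal_f : Prop := ∀ (x : Int), Dom_f x → Pre_f x → Spec_f x (f x)

-- ===== LEMMAS AND PROOFS =====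
theorem fLoopA_closed (n : Nat) : ∀ res : Int,
    fLoopA n res = res + (if n ≠ 0 then (pvPopcount n : Int) + (pvBitLen n : Int) - 1 else 0) := by
  induction n using Nat.strong_induction_on with
  | _ n ih =>
    intro res
    rw [fLoopA]
    by_cases h0 : n = 0
    · simp [h0]
    · rw [if_neg h0, if_pos h0]
      have hd : (n - n % 2) / 2 = n / 2 := by omega
      rw [hd, ih (n / 2) (Nat.div_lt_self (by omega) (by omega))]
      conv_rhs => rw [pvPopcount, pvBitLen, if_neg h0, if_neg h0]
      by_cases h2 : n / 2 = 0
      · have : n = 1 := by omega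
        subst this
        have e1 : pvPopcount 0 = 0 := by rw [pvPopcount]; norm_num
        have e2 : pvBitLen 0 = 0 := by rw [pvBitLen]; norm_num
        norm_num [e1, e2]
      · have hpos : 0 < n - n % 2 := by omega
        have hI : (0:Int) < ((n - n % 2 : Nat) : Int) := by exact_mod_cast hpos
        rw [if_pos h2, if_pos hpos]
        push_cast
        ring

-- ===== VERDICT (by name: the statement is the Claim_ definition above) =====
theorem f_spec : Claim_equal_f := by
  intro x _ hpre
  unfold Pre_f at hpre
  unfold Spec_f f f_alt
  rw [fLoopA_closed]
  have hx : x.toNat = 0 ↔ x = 0 := by omega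
  by_cases h : x = 0
  · simp [h]
  · have : x.toNat ≠ 0 := by omega
    simp [this, h]
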